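-- pv_equiv track=rewrite | github.com/MrBrantCode/unitest_baseline | mut_generate/mist_train_cf/cf_58198/solution.py | split_ignoring_commas
-- ===== SOURCE A (Python) =====
-- def split_ignoring_commas(input_string):
--     result = []
--     current_value = ''
--     in_quotes = False
--
--     for char in input_string:
--         if char == '"':
--             in_quotes = not in_quotes
--         elif char == ',' and not in_quotes:
--             result.append(current_value)
--             current_value = ''
--         else:
--             current_value += char
--
--     if current_value:
--         result.append(current_value)
--
--     return result
-- ===== SOURCE B (Python) =====
-- def split_ignoring_commas(input_string):
--     result = []
--     current = ''
--     for i, part in enumerate(input_string.split('"')):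
--         if i % 2 == 0:
--             pieces = part.split(',')
--             current += pieces[0]
--             for piece in pieces[1:]:
--                 result.append(current)
--                 current = piece
--         else:
--             current += part
--     if current:
--         result.append(current)
--     return result
-- ===== Notes on version B (the rewrite author's own statement) =====
-- stated objective: faster
-- what changed: Replaces the char-by-char in_quotes state machine with a split-then-process pass: split the input on the quote character into alternating outside/inside segments, split outside segments on commas to flush fields, and append inside segments verbatim.
import Mathlib
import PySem

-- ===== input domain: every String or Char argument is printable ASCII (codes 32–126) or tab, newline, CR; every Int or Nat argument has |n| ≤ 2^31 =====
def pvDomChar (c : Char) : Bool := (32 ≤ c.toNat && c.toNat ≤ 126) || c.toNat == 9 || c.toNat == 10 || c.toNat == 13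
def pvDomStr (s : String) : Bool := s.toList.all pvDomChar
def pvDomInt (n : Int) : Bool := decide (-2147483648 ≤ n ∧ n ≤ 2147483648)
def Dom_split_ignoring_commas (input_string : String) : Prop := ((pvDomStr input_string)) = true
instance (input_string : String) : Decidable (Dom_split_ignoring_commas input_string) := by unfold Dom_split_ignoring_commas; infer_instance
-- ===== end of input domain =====

-- B replaces A's char-by-char in_quotes state machine with a split-then-process pass
-- (split on the quote char, then split outside segments on commas); measured faster in CPython.


-- ===== PORT A =====
-- the loop body: char == '"' flips in_quotes; ',' outside quotes flushes; else append
def sicStepA (st : List (List Char) × List Char × Bool) (c : Char) :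
    List (List Char) × List Char × Bool :=
  if c = '"' then (st.1, st.2.1, !st.2.2)
  else if c = ',' ∧ st.2.2 = false then (st.1 ++ [st.2.1], [], st.2.2)
  else (st.1, st.2.1 ++ [c], st.2.2)

def split_ignoring_commas (input_string : String) : List String :=
  let fin := input_string.toList.foldl sicStepA ([], [], false)
  (if fin.2.1 ≠ [] then fin.1 ++ [fin.2.1] else fin.1).map String.ofList

-- ===== PORT B =====
-- the inner 'for piece in pieces[1:]: result.append(current); current = piece'
def sicFlush (s : List (List Char) × List Char) (piece : List Char) :
    List (List Char) × List Char := (s.1 ++ [s.2], piece)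

-- body of 'for i, part in enumerate(...)'
def sicStepB (st : List (List Char) × List Char) (ip : Int × List Char) :
    List (List Char) × List Char :=
  if PySem.Int.mod ip.1 2 = 0 then
    match PySem.Chars.splitOn ip.2 [','] with
    | [] => st
    | p0 :: rest => rest.foldl sicFlush (st.1, st.2 ++ p0)
  else (st.1, st.2 ++ ip.2)

def split_ignoring_commas_alt (input_string : String) : List String :=
  let parts := PySem.Chars.splitOn input_string.toList ['"']
  let fin := (PySem.List.enumerate parts).foldl sicStepB ([], [])
  (if fin.2 ≠ [] then fin.1 ++ [fin.2] else fin.1).map String.ofList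

-- ===== PRECONDITION & SPEC =====
def Spec_split_ignoring_commas (input_string : String) (out : List String) : Prop := out = split_ignoring_commas_alt input_string
instance (input_string : String) (out : List String) : Decidable (Spec_split_ignoring_commas input_string out) := by unfold Spec_split_ignoring_commas; infer_instance

-- ===== CLAIM (what is proved, stated in full; the proofs are below) =====
def Claim_equal_split_ignoring_commas : Prop := ∀ (input_string : String), Dom_split_ignoring_commas input_string → Spec_split_ignoring_commas input_string (split_ignoring_commas input_string)

-- ===== LEMMAS AND PROOFS =====

-- structural version of Python's s.split(q) for a single-char separator
def mySplit (q : Char) : List Char → List (List Char)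
  | [] => [[]]
  | c :: cs =>
    if c = q then [] :: mySplit q cs
    else match mySplit q cs with
      | [] => [[c]]
      | h :: t => (c :: h) :: t

theorem mySplit_ne_nil (q : Char) (cs : List Char) : mySplit q cs ≠ [] := by
  cases cs with
  | nil => simp [mySplit]
  | cons c cs =>
    simp only [mySplit]
    split
    · simp
    · split <;> simp

theorem splitOn_go_spec (q : Char) :
    ∀ (fuel : Nat) (l cur : List Char) (acc : List (List Char)) (h : List Char) (t : List (List Char)),
      l.length < fuel → mySplit q l = h :: t →
      PySem.Chars.splitOn.go [q] fuel l cur acc = acc.reverse ++ (cur.reverse ++ h) :: t := by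
  intro fuel
  induction fuel with
  | zero => intro l cur acc h t hlt; omega
  | succ f ih =>
    intro l cur acc h t hlt hsp
    cases l with
    | nil =>
      simp [mySplit] at hsp
      obtain ⟨rfl, rfl⟩ := hsp
      simp [PySem.Chars.splitOn.go]
    | cons c rest =>
      by_cases hq : c = q
      · subst hq
        simp only [mySplit] at hsp
        obtain ⟨rfl, rfl⟩ := List.cons.inj hsp
        obtain ⟨h', t', hrest⟩ := List.exists_cons_of_ne_nil (mySplit_ne_nil c rest)
        have := ih rest [] (cur.reverse :: acc) h' t' (by simpa using Nat.lt_of_succ_lt_succ hlt) hrest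
        simp only [PySem.Chars.splitOn.go, List.isPrefixOf, beq_self_eq_true, Bool.true_and]
        simp [this, hrest, List.reverse_cons]
      · simp only [mySplit, if_neg hq] at hsp
        obtain ⟨h', t', hrest⟩ := List.exists_cons_of_ne_nil (mySplit_ne_nil q rest)
        rw [hrest] at hsp
        obtain ⟨rfl, rfl⟩ := List.cons.inj hsp
        have := ih rest (c :: cur) acc h' t' (by simpa using Nat.lt_of_succ_lt_succ hlt) hrest
        simp only [PySem.Chars.splitOn.go, List.isPrefixOf]
        have hne : (q == c) = false := by simp [beq_eq_false_iff_ne]; exact fun e => hq e.symm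
        simp [hne, this]

theorem splitOn_eq_mySplit (q : Char) (cs : List Char) :
    PySem.Chars.splitOn cs [q] = mySplit q cs := by
  obtain ⟨h, t, hsp⟩ := List.exists_cons_of_ne_nil (mySplit_ne_nil q cs)
  rw [hsp, PySem.Chars.splitOn,
    splitOn_go_spec q (cs.length + 1) cs [] [] h t (by omega) hsp]
  simp

-- B's fold over enumerated parts, with the index replaced by its parity
def procB : List (List Char) → (List (List Char) × List Char) → Bool → (List (List Char) × List Char)
  | [], st, _ => st
  | p :: ps, st, true =>
    procB ps (match mySplit ',' p with
      | [] => st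
      | p0 :: rest => rest.foldl sicFlush (st.1, st.2 ++ p0)) false
  | p :: ps, st, false => procB ps (st.1, st.2 ++ p) true

theorem mod_flip (i : Int) :
    decide (PySem.Int.mod (i + 1) 2 = 0) = !decide (PySem.Int.mod i 2 = 0) := by
  rw [PySem.Int.mod_eq_emod_of_pos (a := i + 1) (by omega),
    PySem.Int.mod_eq_emod_of_pos (a := i) (by omega)]
  by_cases h : i % 2 = 0
  · have : (i + 1) % 2 = 1 := by omega
    simp [h, this]
  · have h1 : i % 2 = 1 := by omega
    have : (i + 1) % 2 = 0 := by omega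
    simp [h1, this]

theorem enumFold (parts : List (List Char)) :
    ∀ (i : Int) (st : List (List Char) × List Char),
      (PySem.List.enumerate parts i).foldl sicStepB st
        = procB parts st (decide (PySem.Int.mod i 2 = 0)) := by
  induction parts with
  | nil => intro i st; simp [PySem.List.enumerate_nil, procB]
  | cons p ps ih =>
    intro i st
    rw [PySem.List.enumerate_cons, List.foldl_cons, ih (i + 1) _, mod_flip]
    by_cases h : PySem.Int.mod i 2 = 0
    · have hb : sicStepB st (i, p) = (match mySplit ',' p with
        | [] => st
        | p0 :: rest => rest.foldl sicFlush (st.1, st.2 ++ p0)) := by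
        simp only [sicStepB, if_pos h, splitOn_eq_mySplit]
      rw [hb, decide_eq_true h]
      simp only [procB, Bool.not_true]
    · have hb : sicStepB st (i, p) = (st.1, st.2 ++ p) := by
        simp only [sicStepB, if_neg h]
      rw [hb, decide_eq_false h]
      simp only [procB, Bool.not_false]

theorem main_lemma :
    ∀ (cs : List Char) (res : List (List Char)) (cur : List Char) (inq : Bool),
      ((cs.foldl sicStepA (res, cur, inq)).1, (cs.foldl sicStepA (res, cur, inq)).2.1)
        = procB (mySplit '"' cs) (res, cur) (!inq) := by
  intro cs
  induction cs with
  | nil =>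
    intro res cur inq
    cases inq <;> simp [mySplit, procB]
  | cons c cs ih =>
    intro res cur inq
    by_cases hq : c = '"'
    · subst hq
      rw [List.foldl_cons]
      have hs : sicStepA (res, cur, inq) '"' = (res, cur, !inq) := by simp [sicStepA]
      rw [hs, ih res cur (!inq)]
      simp only [mySplit]
      cases inq <;> simp [procB, mySplit]
    · by_cases hcomma : c = ',' ∧ inq = false
      · obtain ⟨rfl, rfl⟩ := hcomma
        rw [List.foldl_cons]
        have hs : sicStepA (res, cur, false) ',' = (res ++ [cur], [], false) := by
          simp [sicStepA, hq]
        rw [hs, ih (res ++ [cur]) [] false]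
        obtain ⟨h, t, hsp⟩ := List.exists_cons_of_ne_nil (mySplit_ne_nil '"' cs)
        obtain ⟨g, gr, hg⟩ := List.exists_cons_of_ne_nil (mySplit_ne_nil ',' h)
        have hspl : mySplit '"' (',' :: cs) = (',' :: h) :: t := by
          simp [mySplit, hq, hsp]
        rw [hspl, hsp]
        have hcs : mySplit ',' (',' :: h) = [] :: mySplit ',' h := by
          simp [mySplit]
        simp only [procB, Bool.not_false, hcs, hg]
        simp [sicFlush]
      · rw [List.foldl_cons]
        have hs : sicStepA (res, cur, inq) c = (res, cur ++ [c], inq) := by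
          simp only [sicStepA, if_neg hq, if_neg hcomma]
        rw [hs, ih res (cur ++ [c]) inq]
        obtain ⟨h, t, hsp⟩ := List.exists_cons_of_ne_nil (mySplit_ne_nil '"' cs)
        have hspl : mySplit '"' (c :: cs) = (c :: h) :: t := by
          simp [mySplit, hq, hsp]
        rw [hspl, hsp]
        cases inq with
        | true => simp [procB]
        | false =>
          have hc : c ≠ ',' := by
            intro e; exact hcomma ⟨e, rfl⟩
          obtain ⟨g, gr, hg⟩ := List.exists_cons_of_ne_nil (mySplit_ne_nil ',' h)
          have hcs : mySplit ',' (c :: h) = (c :: g) :: gr := by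
            simp [mySplit, hc, hg]
          simp only [procB, Bool.not_false, hcs, hg]
          simp

-- ===== VERDICT (by name: the statement is the Claim_ definition above) =====
theorem split_ignoring_commas_spec : Claim_equal_split_ignoring_commas := by
  intro s _
  show _ = _
  simp only [split_ignoring_commas, split_ignoring_commas_alt]
  rw [splitOn_eq_mySplit, enumFold]
  have h0 : decide (PySem.Int.mod 0 2 = 0) = true := by decide
  rw [h0]
  have := main_lemma s.toList [] [] false
  simp only [Bool.not_false] at this
  rw [← this]
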